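-- pv_equiv track=rewrite | github.com/ye-spencer/Zoom-Chat-Counter | zoomchatcounter.py | formatDictionary
-- ===== SOURCE A (Python) =====
-- def getSenderFormattedName(previousName):
-- 	try:
-- 		index = previousName.index(" ")
-- 		return previousName[index:] + previousName[:index]
-- 	except ValueError:
-- 		return previousName
-- 	return "ERROR IN SENDER NAME: " + previousName
--
-- def getMessages(sender, senderList, entries):
-- 	senderEntries = []
-- 	for i in range(len(senderList)):
-- 		if sender == senderList[i]:
-- 			senderEntries.append(entries[i])
-- 	return senderEntries
--
-- def formatDictionary(senderDict, senderList, entryList):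
-- 	toSend = ""
-- 	maxNameLength = 25
-- 	for sender in sorted(senderDict.keys()):
-- 		if (len(sender) > maxNameLength):
-- 			toSend += sender[:maxNameLength] + getSenderFormattedName(str(senderDict[sender])) + "\n"
-- 		else:
-- 			toSend += sender.ljust(maxNameLength) + getSenderFormattedName(str(senderDict[sender])) + "\n"
-- 		for message in getMessages(sender, senderList, entryList):
-- 			toSend += "\t" + message
-- 	return toSend
-- ===== SOURCE B (Python) =====
-- def formatDictionary(senderDict, senderList, entryList):
--     groups = {}
--     for sender, entry in zip(senderList, entryList):
--         groups.setdefault(sender, []).append(entry)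
--     parts = []
--     for sender in sorted(senderDict):
--         name = sender[:25] if len(sender) > 25 else sender.ljust(25)
--         parts.append(name + str(senderDict[sender]) + "\n"
--                      + "".join("\t" + m for m in groups.get(sender, [])))
--     return "".join(parts)
-- ===== Notes on version B (the rewrite author's own statement) =====
-- stated objective: faster
-- what changed: B builds one sender->messages dict in a single pass over zip(senderList, entryList) instead of A's full rescan of senderList for every sender (getMessages), and joins collected parts instead of repeated string concatenation.
-- outside the precondition, e.g. on formatDictionary({'bob': 1}, ['bob'], []): A raises IndexError, B returns 'bob                      1\n'
import Mathlib
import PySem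

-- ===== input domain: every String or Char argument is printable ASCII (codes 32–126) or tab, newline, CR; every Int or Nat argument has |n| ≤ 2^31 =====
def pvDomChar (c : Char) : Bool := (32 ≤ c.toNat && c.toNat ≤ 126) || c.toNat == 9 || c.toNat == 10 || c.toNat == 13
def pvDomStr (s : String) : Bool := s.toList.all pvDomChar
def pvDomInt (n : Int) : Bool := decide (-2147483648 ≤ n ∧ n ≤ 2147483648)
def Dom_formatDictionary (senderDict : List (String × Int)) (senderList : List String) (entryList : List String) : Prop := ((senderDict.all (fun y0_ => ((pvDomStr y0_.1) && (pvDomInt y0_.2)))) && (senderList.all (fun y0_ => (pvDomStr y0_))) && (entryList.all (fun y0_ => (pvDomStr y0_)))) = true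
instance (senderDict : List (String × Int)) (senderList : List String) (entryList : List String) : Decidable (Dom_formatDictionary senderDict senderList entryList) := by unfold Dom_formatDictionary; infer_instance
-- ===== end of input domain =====

-- B replaces A's per-sender rescans of the whole senderList (getMessages) by one dict built in a
-- single pass over zip(senderList, entryList); return value only, no argument is mutated.

-- ===== PORT A =====
-- try: previousName.index(" ") raises ValueError iff " " is absent, i.e. find = -1; the except
-- branch returns previousName unchanged.
def pvGetSenderFormattedName (previousName : String) : String :=
  let index := PySem.Str.find previousName " "
  if index = -1 then previousName
  else PySem.Str.slice previousName (some index) none ++ PySem.Str.slice previousName none (some index)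

-- entries[i] can raise IndexError when entries is shorter than senderList; exactly those inputs are
-- excluded by Pre_formatDictionary below, so the default "" of pyGetD is never the value used.
def pvGetMessages (sender : String) (senderList : List String) (entries : List String) : List String :=
  (PySem.List.pyRange 0 (PySem.List.len senderList) 1).foldl
    (fun senderEntries i =>
      if sender == PySem.List.pyGetD senderList i "" then
        senderEntries ++ [PySem.List.pyGetD entries i ""]
      else senderEntries) []

-- hand port of str.ljust(width) with the default fill character ' ' (exact: width - len spaces appended)
def pvLjust (s : String) (width : Int) : String :=
  s ++ String.ofList (List.replicate (width - PySem.Str.len s).toNat ' ')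

def formatDictionary (senderDict : List (String × Int)) (senderList : List String) (entryList : List String) : String :=
  let d := PySem.Dict.ofList senderDict
  let maxNameLength : Int := 25
  (PySem.List.sorted d.keys (fun k => k) false).foldl
    (fun toSend sender =>
      let toSend :=
        if maxNameLength < PySem.Str.len sender then
          toSend ++ PySem.Str.slice sender none (some maxNameLength)
            ++ pvGetSenderFormattedName (PySem.Int.toStr (d.getD sender 0)) ++ "\n"
        else
          toSend ++ pvLjust sender maxNameLength
            ++ pvGetSenderFormattedName (PySem.Int.toStr (d.getD sender 0)) ++ "\n"
      (pvGetMessages sender senderList entryList).foldl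
        (fun toSend message => toSend ++ "\t" ++ message) toSend)
    ""

-- ===== PORT B =====
def pvGroups (senderList : List String) (entryList : List String) : PySem.Dict String (List String) :=
  (senderList.zip entryList).foldl
    (fun groups p => groups.modify p.1 [] (fun l => l ++ [p.2])) PySem.Dict.empty

def formatDictionary_alt (senderDict : List (String × Int)) (senderList : List String) (entryList : List String) : String :=
  let d := PySem.Dict.ofList senderDict
  let groups := pvGroups senderList entryList
  let parts := (PySem.List.sorted d.keys (fun k => k) false).map
    (fun sender =>
      let name := if 25 < PySem.Str.len sender then PySem.Str.slice sender none (some 25)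
                  else pvLjust sender 25
      name ++ PySem.Int.toStr (d.getD sender 0) ++ "\n"
        ++ PySem.Str.join "" ((groups.getD sender []).map (fun m => "\t" ++ m)))
  PySem.Str.join "" parts

-- ===== PRECONDITION & SPEC =====
-- Pre_ excludes exactly the inputs on which A raises IndexError: a sender of senderDict occurring in
-- senderList at a position with no matching entry in entryList (getMessages then reads entries[i]).
def Pre_formatDictionary (senderDict : List (String × Int)) (senderList : List String) (entryList : List String) : Prop :=
  ∀ (i : Nat) (hi : i < senderList.length), entryList.length ≤ i →
    senderList[i] ∉ senderDict.map Prod.fst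
instance (senderDict : List (String × Int)) (senderList : List String) (entryList : List String) : Decidable (Pre_formatDictionary senderDict senderList entryList) := by unfold Pre_formatDictionary; exact Nat.decidableBallLT _ _

def pvWitness_formatDictionary : (List (String × Int)) × List String × List String :=
  ([("ann", 3), ("bob", -1)], ["bob", "ann", "bob"], ["hi\n", "yo\n", "x\n"])

def Spec_formatDictionary (senderDict : List (String × Int)) (senderList : List String) (entryList : List String) (out : String) : Prop := out = formatDictionary_alt senderDict senderList entryList
instance (senderDict : List (String × Int)) (senderList : List String) (entryList : List String) (out : String) : Decidable (Spec_formatDictionary senderDict senderList entryList out) := by unfold Spec_formatDictionary; infer_instance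

-- ===== CLAIM (what is proved, stated in full; the proofs are below) =====
def Claim_equal_formatDictionary : Prop := ∀ (senderDict : List (String × Int)) (senderList : List String) (entryList : List String), Dom_formatDictionary senderDict senderList entryList → Pre_formatDictionary senderDict senderList entryList → Spec_formatDictionary senderDict senderList entryList (formatDictionary senderDict senderList entryList)

-- ===== LEMMAS AND PROOFS =====

theorem pv_digitChar_ne_space (k : Nat) (hk : k < 10) : Nat.digitChar k ≠ ' ' := by
  interval_cases k <;> decide

theorem pv_toDigitsCore_no_space : ∀ (f n : Nat) (l : List Char), ' ' ∉ l → ' ' ∉ Nat.toDigitsCore 10 f n l := by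
  intro f
  induction f with
  | zero => intro n l h; simpa [Nat.toDigitsCore] using h
  | succ f ih =>
    intro n l h
    rw [Nat.toDigitsCore]
    have hd : ' ' ∉ (n % 10).digitChar :: l := by
      intro hm
      rcases List.mem_cons.mp hm with hm | hm
      · exact pv_digitChar_ne_space (n % 10) (Nat.mod_lt _ (by norm_num)) hm.symm
      · exact h hm
    split
    · exact hd
    · exact ih _ _ hd

theorem pv_no_space_toChars (n : Int) : ' ' ∉ PySem.Int.toChars n := by
  intro hm
  by_cases hn : n < 0 <;> simp only [PySem.Int.toChars, hn, if_pos, if_neg, not_false_iff] at hm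
  · rcases List.mem_cons.mp hm with hm | hm
    · exact absurd hm (by decide)
    · exact pv_toDigitsCore_no_space _ _ [] (by simp) hm
  · exact pv_toDigitsCore_no_space _ _ [] (by simp) hm

theorem pv_fmt_toStr (n : Int) : pvGetSenderFormattedName (PySem.Int.toStr n) = PySem.Int.toStr n := by
  have hfind : PySem.Str.find (PySem.Int.toStr n) " " = -1 := by
    rw [PySem.Str.find_eq_neg_one_iff]
    intro hinf
    have hs : (" " : String).toList = [' '] := by decide
    rw [hs, List.singleton_infix_iff, PySem.Int.toList_toStr] at hinf
    exact pv_no_space_toChars n hinf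
  simp only [pvGetSenderFormattedName, hfind]
  simp

theorem pv_join_empty_cons (p : String) (ps : List String) :
    PySem.Str.join "" (p :: ps) = p ++ PySem.Str.join "" ps := by
  apply String.toList_inj.mp
  cases ps with
  | nil =>
    simp [PySem.Str.toList_join, String.toList_append, PySem.Chars.join_nil]
  | cons q qs =>
    simp [PySem.Str.toList_join, String.toList_append, PySem.Chars.join_cons_cons]

theorem pv_join_empty_nil : PySem.Str.join "" ([] : List String) = "" := by
  apply String.toList_inj.mp
  simp [PySem.Str.toList_join, PySem.Chars.join_nil]

theorem pv_foldl_append_join {α : Type} (l : List α) (f : α → String) :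
    ∀ t : String, l.foldl (fun acc x => acc ++ f x) t = t ++ PySem.Str.join "" (l.map f) := by
  induction l with
  | nil => intro t; simp [pv_join_empty_nil]
  | cons x l ih =>
    intro t
    rw [List.foldl_cons, ih, List.map_cons, pv_join_empty_cons, String.append_assoc]

theorem pv_msgs_fold (msgs : List String) (t : String) :
    msgs.foldl (fun t m => t ++ "\t" ++ m) t
      = t ++ PySem.Str.join "" (msgs.map (fun m => "\t" ++ m)) := by
  have hb : (fun (t m : String) => t ++ "\t" ++ m) = (fun (t m : String) => t ++ ("\t" ++ m)) := by
    funext a b; rw [String.append_assoc]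
  rw [hb]
  exact pv_foldl_append_join msgs (fun m => "\t" ++ m) t

theorem pv_range_fold_filter : ∀ (sl el : List String) (s : String) (acc : List String),
    (∀ (i : Nat) (hi : i < sl.length), el.length ≤ i → sl[i] ≠ s) →
    (List.range sl.length).foldl
      (fun acc k => if s == sl.getD k "" then acc ++ [el.getD k ""] else acc) acc
    = acc ++ ((sl.zip el).filter (fun p => p.1 == s)).map (fun p => p.2) := by
  intro sl
  induction sl with
  | nil => intro el s acc h; simp
  | cons x sl ih =>
    intro el s acc h
    rw [List.length_cons, List.range_succ_eq_map, List.foldl_cons, List.foldl_map]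
    cases el with
    | nil =>
      have hx : (s == x) = false := by
        have hne := h 0 (by simp) (by simp)
        simp only [List.getElem_cons_zero] at hne
        exact beq_eq_false_iff_ne.mpr (fun he => hne he.symm)
      simp only [List.getD_cons_zero, List.getD_cons_succ, hx, Bool.false_eq_true, if_false]
      have hfix : List.foldl
          (fun (a : List String) (k : Nat) =>
            if (s == sl.getD k "") = true then a ++ [List.getD [] k.succ ""] else a)
          acc (List.range sl.length)
          = List.foldl (fun (a : List String) (_ : Nat) => a) acc (List.range sl.length) := by
        apply PySem.List.foldl_congr_mem
        intro a k hk
        have hk' : k < sl.length := List.mem_range.mp hk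
        have hne := h (k + 1) (by simp only [List.length_cons]; omega) (by simp)
        simp only [List.getElem_cons_succ] at hne
        have hb : (s == sl.getD k "") = false := by
          rw [List.getD_eq_getElem sl "" hk']
          exact beq_eq_false_iff_ne.mpr (fun he => hne he.symm)
        rw [hb]
        simp
      rw [hfix, List.foldl_fixed]
      simp
    | cons e el =>
      have h' : ∀ (i : Nat) (hi : i < sl.length), el.length ≤ i → sl[i] ≠ s := by
        intro i hi hle heq
        exact h (i + 1) (by simp only [List.length_cons]; omega)
          (by simp only [List.length_cons]; omega) (by simpa using heq)
      simp only [List.getD_cons_zero, List.getD_cons_succ, List.zip_cons_cons, List.filter_cons]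
      by_cases hx : x = s
      · have h1 : (s == x) = true := beq_iff_eq.mpr hx.symm
        have h2 : ((x, e).1 == s) = true := beq_iff_eq.mpr hx
        rw [h1, if_pos rfl, h2, ih el s (acc ++ [e]) h']
        simp
      · have h1 : (s == x) = false := beq_eq_false_iff_ne.mpr (fun he => hx he.symm)
        have h2 : ((x, e).1 == s) = false := beq_eq_false_iff_ne.mpr hx
        rw [h1, h2]
        simp only [Bool.false_eq_true, if_false]
        exact ih el s acc h'

theorem pv_getMessages_eq (s : String) (sl el : List String)
    (h : ∀ (i : Nat) (hi : i < sl.length), el.length ≤ i → sl[i] ≠ s) :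
    pvGetMessages s sl el = ((sl.zip el).filter (fun p => p.1 == s)).map (fun p => p.2) := by
  unfold pvGetMessages
  rw [PySem.List.len_eq, PySem.List.pyRange_one]
  have hn : ((sl.length : Int) - 0).toNat = sl.length := by omega
  rw [hn, List.foldl_map]
  have hb : (fun (acc : List String) (k : Nat) =>
        if s == PySem.List.pyGetD sl ((0 : Int) + k) "" then
          acc ++ [PySem.List.pyGetD el ((0 : Int) + k) ""] else acc)
      = (fun acc k => if s == sl.getD k "" then acc ++ [el.getD k ""] else acc) := by
    funext acc k
    simp [PySem.List.pyGetD_natCast]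
  rw [hb, pv_range_fold_filter sl el s [] h]
  simp

theorem pv_groups_getD (sl el : List String) (s : String) :
    (pvGroups sl el).getD s [] = ((sl.zip el).filter (fun p => p.1 == s)).map (fun p => p.2) := by
  unfold pvGroups
  rw [PySem.Dict.getD_foldl_modify_append]
  simp

theorem pv_mem_keys_ofList (sd : List (String × Int)) (s : String)
    (h : s ∈ (PySem.Dict.ofList sd).keys) : s ∈ sd.map Prod.fst := by
  have he : PySem.Dict.ofList sd
      = sd.foldl (fun (d : PySem.Dict String Int) p => d.insert p.1 p.2) PySem.Dict.empty := rfl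
  rw [he, PySem.Dict.keys_foldl_insert_key sd Prod.fst (fun _ p => p.2), PySem.Dict.keys_empty] at h
  rcases (PySem.Set.mem_update _ _ _).mp h with h | h
  · exact absurd h (List.not_mem_nil)
  · exact h

-- ===== VERDICT (by name: the statement is the Claim_ definition above) =====
theorem formatDictionary_spec : Claim_equal_formatDictionary := by
  intro sd sl el hdom hpre
  unfold Spec_formatDictionary formatDictionary formatDictionary_alt
  have hcongr : ∀ (acc : String),
      ∀ sender ∈ PySem.List.sorted (PySem.Dict.ofList sd).keys (fun k => k) false,
      (fun (toSend : String) sender =>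
        List.foldl (fun toSend message => toSend ++ "\t" ++ message)
          (if (25 : Int) < PySem.Str.len sender then
            toSend ++ PySem.Str.slice sender none (some 25)
              ++ pvGetSenderFormattedName (PySem.Int.toStr ((PySem.Dict.ofList sd).getD sender 0)) ++ "\n"
          else
            toSend ++ pvLjust sender 25
              ++ pvGetSenderFormattedName (PySem.Int.toStr ((PySem.Dict.ofList sd).getD sender 0)) ++ "\n")
          (pvGetMessages sender sl el)) acc sender
      = acc ++ ((if (25 : Int) < PySem.Str.len sender then PySem.Str.slice sender none (some 25)
            else pvLjust sender 25)
          ++ PySem.Int.toStr ((PySem.Dict.ofList sd).getD sender 0) ++ "\n"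
          ++ PySem.Str.join "" (((pvGroups sl el).getD sender []).map (fun m => "\t" ++ m))) := by
    intro acc sender hs
    have hkey : sender ∈ sd.map Prod.fst :=
      pv_mem_keys_ofList sd sender ((PySem.List.mem_sorted _ _ _ _).mp hs)
    have hmsg : pvGetMessages sender sl el = (pvGroups sl el).getD sender [] := by
      rw [pv_getMessages_eq sender sl el (fun i hi hle heq => hpre i hi hle (heq ▸ hkey)),
        pv_groups_getD]
    simp only [pv_msgs_fold, hmsg, pv_fmt_toStr]
    by_cases hlen : (25 : Int) < PySem.Str.len sender
    · rw [if_pos hlen, if_pos hlen]; simp [String.append_assoc]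
    · rw [if_neg hlen, if_neg hlen]; simp [String.append_assoc]
  rw [PySem.List.foldl_congr_mem _ _ _ "" hcongr, pv_foldl_append_join]
  simp
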